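-- pv_equiv track=rewrite | github.com/JDaniloC/Projeto-2025-IF691 | src/x_sem_ad.py | check_alt_resp
-- ===== SOURCE A (Python) =====
-- def check_alt_resp(trace, aj, ak):
--     last_aj_index = -1
--     for i in range(len(trace)):
--         if trace[i] == aj:
--             if last_aj_index != -1 and ak not in trace[last_aj_index+1:i]:
--                 return False
--             last_aj_index = i
--     return True
-- ===== SOURCE B (Python) =====
-- def check_alt_resp(trace, aj, ak):
--     # Single pass: track whether an aj was seen and whether ak occurred since the last aj (no slicing).
--     seen_aj = False
--     seen_ak = False
--     for x in trace:
--         if x == aj: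
--             if seen_aj and not seen_ak:
--                 return False
--             seen_aj = True
--             seen_ak = False
--         elif x == ak:
--             seen_ak = True
--     return True
-- ===== Notes on version B (the rewrite author's own statement) =====
-- stated objective: alternative
-- what changed: Replaced the index loop that re-scans the slice between consecutive aj occurrences for ak by a single pass over the elements tracking a seen-aj flag and a seen-ak-since-last-aj flag.
import Mathlib
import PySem

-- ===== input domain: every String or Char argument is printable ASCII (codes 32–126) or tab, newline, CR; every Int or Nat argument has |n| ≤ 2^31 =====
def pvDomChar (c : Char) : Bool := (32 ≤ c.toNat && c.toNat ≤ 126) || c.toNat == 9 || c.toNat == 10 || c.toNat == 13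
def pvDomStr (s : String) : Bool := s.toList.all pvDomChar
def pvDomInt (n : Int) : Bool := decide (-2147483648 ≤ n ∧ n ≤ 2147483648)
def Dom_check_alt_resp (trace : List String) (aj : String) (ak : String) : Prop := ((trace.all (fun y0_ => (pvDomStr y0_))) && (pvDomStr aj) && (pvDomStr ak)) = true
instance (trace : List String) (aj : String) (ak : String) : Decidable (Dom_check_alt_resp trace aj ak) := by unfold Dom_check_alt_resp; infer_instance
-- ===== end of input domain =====

-- B replaces A's slice-membership re-scans by a single pass with two flags (alternative algorithm, same measured cost).

-- ===== PORT A =====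
-- the for-loop over range(len(trace)) with early return False, state = last_aj_index
def aGo (trace : List String) (aj ak : String) : List Int → Int → Bool
  | [], _ => true
  | i :: is, last =>
    if PySem.List.pyGetD trace i "" == aj then
      if last != -1 && !((PySem.List.slice trace (some (last + 1)) (some i)).contains ak) then
        false
      else aGo trace aj ak is i
    else aGo trace aj ak is last

def check_alt_resp (trace : List String) (aj : String) (ak : String) : Bool :=
  aGo trace aj ak (PySem.List.pyRange 0 (PySem.List.len trace) 1) (-1)

-- ===== PORT B =====
-- the single pass with flags seen_aj / seen_ak, early return False
def bGo (aj ak : String) : List String → Bool → Bool → Bool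
  | [], _, _ => true
  | x :: rest, seenAj, seenAk =>
    if x == aj then
      if seenAj && !seenAk then false
      else bGo aj ak rest true false
    else if x == ak then bGo aj ak rest seenAj true
    else bGo aj ak rest seenAj seenAk

def check_alt_resp_alt (trace : List String) (aj : String) (ak : String) : Bool :=
  bGo aj ak trace false false

-- ===== PRECONDITION & SPEC =====
def Spec_check_alt_resp (trace : List String) (aj : String) (ak : String) (out : Bool) : Prop := out = check_alt_resp_alt trace aj ak
instance (trace : List String) (aj : String) (ak : String) (out : Bool) : Decidable (Spec_check_alt_resp trace aj ak out) := by unfold Spec_check_alt_resp; infer_instance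

-- ===== CLAIM (what is proved, stated in full; the proofs are below) =====
def Claim_equal_check_alt_resp : Prop := ∀ (trace : List String) (aj : String) (ak : String), Dom_check_alt_resp trace aj ak → Spec_check_alt_resp trace aj ak (check_alt_resp trace aj ak)

-- ===== LEMMAS AND PROOFS =====

-- before the first aj, B's seen_ak flag is irrelevant (it is reset at the first aj)
theorem bGo_false_indep (aj ak : String) (l : List String) (s s' : Bool) :
    bGo aj ak l false s = bGo aj ak l false s' := by
  induction l generalizing s s' with
  | nil => rfl
  | cons x rest ih =>
    simp only [bGo, Bool.false_and, Bool.false_eq_true, if_false]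
    split_ifs <;> first | rfl | exact ih _ _

-- invariant after an aj has been seen at index `last`:
-- B's seen_ak flag equals "ak occurs in tr[last+1 : p]"
theorem aGo_eq_bGo_seen (tr : List String) (aj ak : String) :
    ∀ (k p last : Nat), tr.length - p = k → last < p →
      aGo tr aj ak (PySem.List.pyRange (p : Int) ((tr.length : Nat) : Int) 1) (last : Int) =
      bGo aj ak (tr.drop p) true
        (((tr.drop (last + 1)).take (p - (last + 1))).contains ak) := by
  intro k
  induction k with
  | zero =>
    intro p last hk _
    have hp : tr.length ≤ p := by omega
    rw [PySem.List.pyRange_one_eq_nil (by exact_mod_cast hp), List.drop_eq_nil_of_le hp]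
    rfl
  | succ k ih =>
    intro p last hk hlp
    have hp : p < tr.length := by omega
    rw [PySem.List.pyRange_one_cons (by exact_mod_cast hp)]
    rw [List.drop_eq_getElem_cons hp]
    have hgd : PySem.List.pyGetD tr (p : Int) "" = tr[p] := by
      simp [List.getD_eq_getElem?_getD, List.getElem?_eq_getElem hp]
    have hcast : ((p : Int) + 1) = ((p + 1 : Nat) : Int) := by push_cast; ring
    have hslice : PySem.List.slice tr (some ((last : Int) + 1)) (some (p : Int)) =
        (tr.drop (last + 1)).take (p - (last + 1)) := by
      have h1 : ((last : Int) + 1) = ((last + 1 : Nat) : Int) := by push_cast; ring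
      rw [h1, PySem.List.slice_natCast]
    have hlastne : ((last : Int) != -1) = true := by
      simp only [bne, Bool.not_eq_true', beq_eq_false_iff_ne, ne_eq]
      omega
    simp only [aGo, bGo, hgd, hslice, hlastne, Bool.true_and, hcast]
    by_cases hx : tr[p] = aj
    · simp only [hx, beq_self_eq_true, if_true]
      by_cases hc : ((tr.drop (last + 1)).take (p - (last + 1))).contains ak
      · simp only [hc, Bool.not_true, Bool.false_eq_true, if_false]
        simpa using ih (p + 1) p (by omega) (by omega)
      · have hc' : ak ∉ (tr.drop (last + 1)).take (p - (last + 1)) := by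
          simpa using hc
        simp [hc']
    · have hx' : (tr[p] == aj) = false := by simp [hx]
      simp only [hx', Bool.false_eq_true, if_false]
      rw [ih (p + 1) last (by omega) (by omega)]
      have htake : (tr.drop (last + 1)).take (p + 1 - (last + 1)) =
          (tr.drop (last + 1)).take (p - (last + 1)) ++ [tr[p]] := by
        have h1 : p + 1 - (last + 1) = (p - (last + 1)) + 1 := by omega
        have h2 : (tr.drop (last + 1))[p - (last + 1)]? = some tr[p] := by
          rw [List.getElem?_drop]
          rw [List.getElem?_eq_getElem (by omega)]
          congr 2
          omega
        rw [h1, List.take_add_one, h2]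
        rfl
      rw [htake]
      by_cases hy : tr[p] = ak
      · simp [hy]
      · have hy' : ¬ (ak = tr[p]) := fun h => hy h.symm
        simp [hy', hy]

-- before any aj has been seen: A's last_aj_index is -1, B's seen_aj is false
theorem aGo_eq_bGo_unseen (tr : List String) (aj ak : String) :
    ∀ (k p : Nat), tr.length - p = k →
      aGo tr aj ak (PySem.List.pyRange (p : Int) ((tr.length : Nat) : Int) 1) (-1) =
      bGo aj ak (tr.drop p) false false := by
  intro k
  induction k with
  | zero =>
    intro p hk
    have hp : tr.length ≤ p := by omega
    rw [PySem.List.pyRange_one_eq_nil (by exact_mod_cast hp), List.drop_eq_nil_of_le hp]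
    rfl
  | succ k ih =>
    intro p hk
    have hp : p < tr.length := by omega
    rw [PySem.List.pyRange_one_cons (by exact_mod_cast hp)]
    rw [List.drop_eq_getElem_cons hp]
    have hgd : PySem.List.pyGetD tr (p : Int) "" = tr[p] := by
      simp [List.getD_eq_getElem?_getD, List.getElem?_eq_getElem hp]
    have hcast : ((p : Int) + 1) = ((p + 1 : Nat) : Int) := by push_cast; ring
    simp only [aGo, bGo, hgd, hcast, bne_self_eq_false, Bool.false_and,
      Bool.false_eq_true, if_false]
    by_cases hx : tr[p] = aj
    · simp only [hx, beq_self_eq_true, if_true]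
      simpa using aGo_eq_bGo_seen tr aj ak (tr.length - (p + 1)) (p + 1) p rfl (by omega)
    · have hx' : (tr[p] == aj) = false := by simp [hx]
      simp only [hx', Bool.false_eq_true, if_false]
      rw [ih (p + 1) (by omega)]
      by_cases hy : tr[p] = ak
      · simp only [hy, beq_self_eq_true, if_true]
        exact bGo_false_indep aj ak _ false true
      · simp [hy]

-- ===== VERDICT (by name: the statement is the Claim_ definition above) =====
theorem check_alt_resp_spec : Claim_equal_check_alt_resp := by
  intro tr aj ak _
  unfold Spec_check_alt_resp check_alt_resp check_alt_resp_alt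
  have h0 : ((0 : Int)) = ((0 : Nat) : Int) := by norm_num
  rw [PySem.List.len_eq, h0]
  simpa using aGo_eq_bGo_unseen tr aj ak tr.length 0 (by omega)
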